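-- pv_equiv track=rewrite | github.com/zhawhjw/Calculator_with_DB | statistics/statistics.py | frequencyTable
-- ===== SOURCE A (Python) =====
-- import collections
--
-- def frequencyTable(data):
--     """
--     This piece is based on Python mode function
--     :param data: data list
--     :return: frequency table
--     """
--     # Generate a table of sorted (value, frequency) pairs.
--     table = collections.Counter(iter(data)).most_common()
--     if not table:
--         return table
--     # Extract the values with the highest frequency.
--     maxfreq = table[0][1]
--     for i in range(1, len(table)):
--         if table[i][1] != maxfreq:
--             table = table[:i]
--             break
--     return table
-- ===== SOURCE B (Python) =====
-- import collections
--
-- def frequencyTable(data):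
--     # One max scan + one filtering pass over Counter items in insertion order,
--     # instead of most_common()'s sort-then-trim-prefix.
--     c = collections.Counter(iter(data))
--     if not c:
--         return []
--     maxfreq = max(c.values())
--     return [(v, f) for v, f in c.items() if f == maxfreq]
-- ===== Notes on version B (the rewrite author's own statement) =====
-- stated objective: alternative
-- what changed: Replaces most_common()'s sort-then-trim-prefix with a single max scan over the Counter's values plus one filtering pass over its insertion-ordered items.
import Mathlib
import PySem

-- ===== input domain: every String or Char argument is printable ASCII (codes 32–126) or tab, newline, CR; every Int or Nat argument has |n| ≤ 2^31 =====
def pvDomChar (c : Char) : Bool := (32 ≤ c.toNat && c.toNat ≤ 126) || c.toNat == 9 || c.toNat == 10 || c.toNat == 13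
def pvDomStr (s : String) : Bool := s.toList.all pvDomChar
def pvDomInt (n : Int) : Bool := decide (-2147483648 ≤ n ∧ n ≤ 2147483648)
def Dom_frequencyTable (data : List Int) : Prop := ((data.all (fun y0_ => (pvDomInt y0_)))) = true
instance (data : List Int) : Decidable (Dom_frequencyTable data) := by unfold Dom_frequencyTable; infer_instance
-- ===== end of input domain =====

-- B replaces most_common()'s sort-then-trim-prefix with one max scan plus one
-- filtering pass over the Counter's insertion-ordered items (alternative algorithm).

-- ===== PORT A =====
-- the `for i in range(1, len(table)): if table[i][1] != maxfreq: table = table[:i]; break` loop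
def pvTrimLoop (table : List (Int × Int)) (maxfreq : Int) (i : Nat) : List (Int × Int) :=
  if h : i < table.length then
    if table[i].2 ≠ maxfreq then table.take i
    else pvTrimLoop table maxfreq (i + 1)
  else table
termination_by table.length - i

def frequencyTable (data : List Int) : List (Int × Int) :=
  -- table = collections.Counter(iter(data)).most_common()
  match PySem.List.sorted (PySem.Dict.counter data).items (fun p => p.2) true with
  | [] => []                                            -- if not table: return table
  | (v, f) :: rest => pvTrimLoop ((v, f) :: rest) f 1   -- maxfreq = table[0][1]; the trim loop

-- ===== PORT B =====
def frequencyTable_alt (data : List Int) : List (Int × Int) :=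
  let c := PySem.Dict.counter data
  if c.items = [] then []                               -- if not c: return []
  else
    match PySem.List.max? (PySem.Dict.values c) (fun x => x) with
    | none => []                                        -- unreachable: c is nonempty here
    | some maxfreq => c.items.filter (fun p => p.2 == maxfreq)

-- ===== PRECONDITION & SPEC =====
def Spec_frequencyTable (data : List Int) (out : List (Int × Int)) : Prop := out = frequencyTable_alt data
instance (data : List Int) (out : List (Int × Int)) : Decidable (Spec_frequencyTable data out) := by unfold Spec_frequencyTable; infer_instance

-- ===== CLAIM (what is proved, stated in full; the proofs are below) =====
def Claim_equal_frequencyTable : Prop := ∀ (data : List Int), Dom_frequencyTable data → Spec_frequencyTable data (frequencyTable data)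

-- ===== LEMMAS AND PROOFS =====

-- the A-side loop trims at the first index ≥ i whose frequency differs
theorem pvTrimLoop_eq (table : List (Int × Int)) (f : Int) (i : Nat) :
    pvTrimLoop table f i = table.take i ++ (table.drop i).takeWhile (fun p => p.2 == f) := by
  fun_induction pvTrimLoop table f i with
  | case1 i hi hne =>
    rw [List.drop_eq_getElem_cons hi, List.takeWhile_cons]
    simp [hne]
  | case2 i hi heq ih =>
    rw [not_not] at heq
    rw [ih, List.drop_eq_getElem_cons hi, List.takeWhile_cons]
    have ht : List.take (i+1) table = List.take i table ++ [table[i]] := by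
      rw [List.take_add_one, List.getElem?_eq_getElem hi]; rfl
    rw [ht, List.append_assoc]
    simp [heq]
  | case3 i hi =>
    rw [List.drop_eq_nil_of_le (by omega), List.take_of_length_le (by omega)]
    simp

theorem insertBy_cons (bf : (Int × Int) → (Int × Int) → Bool) (x y : Int × Int) (ys : List (Int × Int)) :
    PySem.List.insertBy bf x (y :: ys)
      = if bf x y then x :: y :: ys else y :: PySem.List.insertBy bf x ys := rfl

-- inserting an element of maximal key appends it to the maximal prefix
theorem takeWhile_insertBy_eq (M : Int) (x : Int × Int) (acc : List (Int × Int))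
    (hx : x.2 = M) (hle : ∀ p ∈ acc, p.2 ≤ M) :
    (PySem.List.insertBy (fun a b : Int × Int => decide (b.2 < a.2)) x acc).takeWhile
        (fun p => p.2 == M)
      = acc.takeWhile (fun p => p.2 == M) ++ [x] := by
  induction acc with
  | nil => simp [PySem.List.insertBy, hx]
  | cons y ys ih =>
    rw [insertBy_cons]
    by_cases hy : y.2 < x.2
    · rw [if_pos (by simpa using hy)]
      have hyM : ¬ (y.2 = M) := by omega
      simp [hx, hyM]
    · rw [if_neg (by simpa using hy)]
      have hyM : y.2 = M := le_antisymm (hle y (by simp)) (by omega)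
      simp only [List.takeWhile_cons, hyM, BEq.rfl, if_pos]
      rw [ih (fun p hp => hle p (by simp [hp]))]
      simp

-- inserting an element of sub-maximal key leaves the maximal prefix unchanged
theorem takeWhile_insertBy_lt (M : Int) (x : Int × Int) (acc : List (Int × Int))
    (hx : x.2 < M) :
    (PySem.List.insertBy (fun a b : Int × Int => decide (b.2 < a.2)) x acc).takeWhile
        (fun p => p.2 == M)
      = acc.takeWhile (fun p => p.2 == M) := by
  induction acc with
  | nil =>
    have hxM : ¬ (x.2 = M) := by omega
    simp [PySem.List.insertBy, hxM]
  | cons y ys ih =>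
    rw [insertBy_cons]
    by_cases hy : y.2 < x.2
    · rw [if_pos (by simpa using hy)]
      have hxM : ¬ (x.2 = M) := by omega
      have hyM : ¬ (y.2 = M) := by omega
      simp [hxM, hyM]
    · rw [if_neg (by simpa using hy)]
      by_cases hyM : y.2 = M
      · simp [hyM, ih]
      · simp [hyM]

-- stable descending sort: the maximal-frequency prefix is the filter, in original order
theorem takeWhile_sortedRev_eq_filter (l : List (Int × Int)) (M : Int)
    (hle : ∀ p ∈ l, p.2 ≤ M) :
    (PySem.List.sorted l (fun p => p.2) true).takeWhile (fun p => p.2 == M)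
      = l.filter (fun p => p.2 == M) := by
  induction l using List.reverseRecOn with
  | nil => simp [PySem.List.sorted]
  | append_singleton xs x ih =>
    rw [PySem.List.sorted_rev_eq_foldl_insertBy, List.foldl_append, List.foldl_cons, List.foldl_nil,
      ← PySem.List.sorted_rev_eq_foldl_insertBy]
    have hxs : ∀ p ∈ xs, p.2 ≤ M := fun p hp => hle p (by simp [hp])
    have hx : x.2 ≤ M := hle x (by simp)
    have hmem : ∀ p ∈ PySem.List.sorted xs (fun p => p.2) true, p.2 ≤ M := by
      intro p hp
      exact hxs p ((PySem.List.mem_sorted _ _ _ _).1 hp)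
    rw [List.filter_append]
    by_cases hxM : x.2 = M
    · rw [takeWhile_insertBy_eq M x _ hxM hmem, ih hxs]
      simp [hxM]
    · have hlt : x.2 < M := lt_of_le_of_ne hx hxM
      rw [takeWhile_insertBy_lt M x _ hlt, ih hxs]
      simp [hxM]

-- ===== VERDICT (by name: the statement is the Claim_ definition above) =====
theorem frequencyTable_spec : Claim_equal_frequencyTable := by
  intro data _
  unfold Spec_frequencyTable frequencyTable frequencyTable_alt
  cases hst : PySem.List.sorted (PySem.Dict.counter data).items (fun p => p.2) true with
  | nil =>
    have hl : (PySem.Dict.counter data).items = [] :=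
      (PySem.List.sorted_eq_nil_iff _ _ _).1 hst
    simp [hl]
  | cons hd rest =>
    obtain ⟨v, f⟩ := hd
    have hlne : (PySem.Dict.counter data).items ≠ [] := by
      intro h
      rw [h] at hst
      simp [PySem.List.sorted] at hst
    have hge : ∀ y ∈ (PySem.Dict.counter data).items, y.2 ≤ f :=
      fun y hy => PySem.List.key_head_sorted_rev_ge _ _ hst y hy
    simp only [if_neg hlne]
    have hvals : PySem.Dict.values (PySem.Dict.counter data)
        = (PySem.Dict.counter data).items.map (fun p => p.2) := rfl
    cases hm : PySem.List.max? (PySem.Dict.values (PySem.Dict.counter data)) (fun x => x) with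
    | none =>
      exfalso
      have := (PySem.List.max?_eq_none_iff _ _).1 hm
      rw [hvals] at this
      exact hlne (List.map_eq_nil_iff.1 this)
    | some m =>
      have hisMax := PySem.List.max?_isMax hm
      have hmem := PySem.List.max?_mem hm
      rw [hvals] at hisMax hmem
      -- f ≤ m : f is a frequency in the list
      have hvf : (v, f) ∈ (PySem.Dict.counter data).items := by
        have : (v, f) ∈ PySem.List.sorted (PySem.Dict.counter data).items (fun p => p.2) true := by
          rw [hst]; exact List.mem_cons_self
        exact (PySem.List.mem_sorted _ _ _ _).1 this
      have hfm : f ≤ m := hisMax f (List.mem_map.2 ⟨(v, f), hvf, rfl⟩)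
      -- m ≤ f : every frequency is ≤ the head's
      have hmf : m ≤ f := by
        obtain ⟨p, hp, hpm⟩ := List.mem_map.1 hmem
        exact hpm ▸ hge p hp
      have hmfeq : m = f := le_antisymm hmf hfm
      rw [pvTrimLoop_eq, hmfeq]
      have hcore := takeWhile_sortedRev_eq_filter (PySem.Dict.counter data).items f hge
      rw [hst, List.takeWhile_cons] at hcore
      simp only [BEq.rfl, if_pos] at hcore
      simp [← hcore]
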